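-- pv_equiv track=rewrite | github.com/usserj/Ecommerce_php | flask-app/validate_and_migrate_db.py | types_match
-- ===== SOURCE A (Python) =====
-- def types_match(type1, type2):
--     """Verificar si dos tipos son compatibles."""
--     # Normalizar
--     type1 = type1.replace('(11)', '').replace(' ', '')
--     type2 = type2.replace('(11)', '').replace(' ', '')
--
--     # Equivalencias comunes
--     equivalents = [
--         {'int', 'integer'},
--         {'text', 'longtext', 'mediumtext'},
--         {'tinyint(1)', 'boolean'},
--         {'varchar', 'string'},
--     ]
--
--     if type1 == type2:
--         return True
--
--     for equiv_set in equivalents: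
--         if any(t in type1 for t in equiv_set) and any(t in type2 for t in equiv_set):
--             return True
--
--     return False
-- ===== SOURCE B (Python) =====
-- # Token -> group-id hash table; each string is scanned once position by position,
-- # looking up its fixed-length slices in the table (multi-pattern match by text scan
-- # instead of per-group substring searches).
-- _TOKEN_GROUP = {
--     'int': 0, 'integer': 0,
--     'text': 1, 'longtext': 1, 'mediumtext': 1,
--     'tinyint(1)': 2, 'boolean': 2,
--     'varchar': 3, 'string': 3,
-- }
-- _LENGTHS = (3, 4, 6, 7, 8, 10)  # the distinct token lengths
--
--
-- def _groups(s):
--     """Group ids of all equivalence tokens occurring in s, by position scan."""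
--     found = set()
--     for i in range(len(s)):
--         for L in _LENGTHS:
--             g = _TOKEN_GROUP.get(s[i:i + L])
--             if g is not None:
--                 found.add(g)
--     return found
--
--
-- def types_match(type1, type2):
--     """Verificar si dos tipos son compatibles."""
--     type1 = type1.replace('(11)', '').replace(' ', '')
--     type2 = type2.replace('(11)', '').replace(' ', '')
--     return type1 == type2 or not _groups(type1).isdisjoint(_groups(type2))
-- ===== Notes on version B (the rewrite author's own statement) =====
-- stated objective: alternative
-- what changed: A searches each of the 9 synonym substrings in both strings group by group with an early return; B builds a token->group hash table once and scans each string position by position, looking up its fixed-length slices in the table to collect the string's group ids, then intersects the two id sets.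
import Mathlib
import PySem

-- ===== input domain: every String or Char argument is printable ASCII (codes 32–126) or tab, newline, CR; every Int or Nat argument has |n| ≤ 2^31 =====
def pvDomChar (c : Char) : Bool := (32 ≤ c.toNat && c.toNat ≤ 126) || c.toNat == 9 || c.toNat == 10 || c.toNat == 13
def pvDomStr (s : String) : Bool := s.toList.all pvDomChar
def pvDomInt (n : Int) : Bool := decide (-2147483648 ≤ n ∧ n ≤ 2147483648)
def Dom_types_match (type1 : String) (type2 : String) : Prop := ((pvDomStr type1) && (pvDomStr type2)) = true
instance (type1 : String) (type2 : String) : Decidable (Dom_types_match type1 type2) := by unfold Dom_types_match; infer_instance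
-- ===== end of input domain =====

-- B replaces A's per-group substring searches by one token->group hash table and a
-- single position scan of each string, looking up fixed-length slices in the table,
-- then intersecting the two collected id sets; same result (objective: alternative).

-- ===== PORT A =====
-- the literal 'equivalents' list A writes inline (set order irrelevant: only any() is taken)
def tmGroups : List (List String) :=
  [["int", "integer"],
   ["text", "longtext", "mediumtext"],
   ["tinyint(1)", "boolean"],
   ["varchar", "string"]]

-- the 'for equiv_set in equivalents' loop with early return True
def tmLoop : List (List String) → String → String → Bool
  | [], _, _ => false
  | g :: rest, t1, t2 =>
    if (g.any fun t => PySem.Str.isIn t t1) && (g.any fun t => PySem.Str.isIn t t2) then true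
    else tmLoop rest t1 t2

def types_match (type1 : String) (type2 : String) : Bool :=
  let t1 := PySem.Str.replace (PySem.Str.replace type1 "(11)" "") " " ""
  let t2 := PySem.Str.replace (PySem.Str.replace type2 "(11)" "") " " ""
  if t1 == t2 then true else tmLoop tmGroups t1 t2

-- ===== PORT B =====
-- the module-level _TOKEN_GROUP dict (token -> group id)
def bTokenGroup : PySem.Dict String Int :=
  PySem.Dict.ofList
    [("int", 0), ("integer", 0),
     ("text", 1), ("longtext", 1), ("mediumtext", 1),
     ("tinyint(1)", 2), ("boolean", 2),
     ("varchar", 3), ("string", 3)]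

-- the module-level _LENGTHS tuple (the distinct token lengths)
def bLens : List Nat := [3, 4, 6, 7, 8, 10]

-- the inner 'for L in _LENGTHS' loop: dict lookup of s[i:i+L]
def bStep (s : String) (i : Int) (found : PySem.Set Int) : PySem.Set Int :=
  bLens.foldl (fun acc (L : Nat) =>
    match PySem.Dict.get? bTokenGroup (PySem.Str.slice s (some i) (some (i + (L : Int)))) with
    | some g => PySem.Set.add acc g
    | none => acc) found

-- the 'for i in range(len(s))' loop of _groups
def bGroups (s : String) : PySem.Set Int :=
  (PySem.List.pyRange 0 (PySem.Str.len s) 1).foldl (fun found i => bStep s i found) PySem.Set.empty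

def types_match_alt (type1 : String) (type2 : String) : Bool :=
  let t1 := PySem.Str.replace (PySem.Str.replace type1 "(11)" "") " " ""
  let t2 := PySem.Str.replace (PySem.Str.replace type2 "(11)" "") " " ""
  t1 == t2 || !(PySem.Set.isdisjoint (bGroups t1) (bGroups t2))

-- ===== PRECONDITION & SPEC =====
def Spec_types_match (type1 : String) (type2 : String) (out : Bool) : Prop := out = types_match_alt type1 type2
instance (type1 : String) (type2 : String) (out : Bool) : Decidable (Spec_types_match type1 type2 out) := by unfold Spec_types_match; infer_instance

-- ===== CLAIM (what is proved, stated in full; the proofs are below) =====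
def Claim_equal_types_match : Prop := ∀ (type1 : String) (type2 : String), Dom_types_match type1 type2 → Spec_types_match type1 type2 (types_match type1 type2)

-- ===== LEMMAS AND PROOFS =====

-- the four per-group "any token occurs" tests, in the shape A's any() computes them
def gA (s : String) : Bool := PySem.Str.isIn "int" s || PySem.Str.isIn "integer" s
def gB (s : String) : Bool := PySem.Str.isIn "text" s || (PySem.Str.isIn "longtext" s || PySem.Str.isIn "mediumtext" s)
def gC (s : String) : Bool := PySem.Str.isIn "tinyint(1)" s || PySem.Str.isIn "boolean" s
def gD (s : String) : Bool := PySem.Str.isIn "varchar" s || PySem.Str.isIn "string" s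

-- A's loop is the disjunction of the four per-group conjunctions
theorem tmLoop_eq (s1 s2 : String) :
    tmLoop tmGroups s1 s2 =
      (gA s1 && gA s2 || (gB s1 && gB s2 || (gC s1 && gC s2 || gD s1 && gD s2))) := by
  simp only [tmGroups, tmLoop, List.any_cons, List.any_nil, Bool.or_false, gA, gB, gC, gD]
  generalize (PySem.Str.isIn "int" s1 || PySem.Str.isIn "integer" s1) = x1
  generalize (PySem.Str.isIn "text" s1 || (PySem.Str.isIn "longtext" s1 || PySem.Str.isIn "mediumtext" s1)) = x2
  generalize (PySem.Str.isIn "tinyint(1)" s1 || PySem.Str.isIn "boolean" s1) = x3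
  generalize (PySem.Str.isIn "varchar" s1 || PySem.Str.isIn "string" s1) = x4
  generalize (PySem.Str.isIn "int" s2 || PySem.Str.isIn "integer" s2) = y1
  generalize (PySem.Str.isIn "text" s2 || (PySem.Str.isIn "longtext" s2 || PySem.Str.isIn "mediumtext" s2)) = y2
  generalize (PySem.Str.isIn "tinyint(1)" s2 || PySem.Str.isIn "boolean" s2) = y3
  generalize (PySem.Str.isIn "varchar" s2 || PySem.Str.isIn "string" s2) = y4
  cases x1 <;> cases x2 <;> cases x3 <;> cases x4 <;>
    cases y1 <;> cases y2 <;> cases y3 <;> cases y4 <;> decide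

-- membership after B's inner lookup loop (generalized over the length list)
theorem mem_bFold (s : String) (i : Int) (ls : List Nat) (found : PySem.Set Int) (g : Int) :
    g ∈ ls.foldl (fun acc (L : Nat) =>
        match PySem.Dict.get? bTokenGroup (PySem.Str.slice s (some i) (some (i + (L : Int)))) with
        | some g => PySem.Set.add acc g
        | none => acc) found ↔
      g ∈ found ∨ ∃ L ∈ ls,
        PySem.Dict.get? bTokenGroup (PySem.Str.slice s (some i) (some (i + (L : Int)))) = some g := by
  induction ls generalizing found with
  | nil => simp
  | cons L rest ih =>
    simp only [List.foldl_cons, ih, List.mem_cons]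
    cases h : PySem.Dict.get? bTokenGroup (PySem.Str.slice s (some i) (some (i + (L : Int)))) with
    | none =>
      constructor
      · rintro (hg | ⟨M, hM, hMg⟩)
        · exact Or.inl hg
        · exact Or.inr ⟨M, Or.inr hM, hMg⟩
      · rintro (hg | ⟨M, rfl | hM, hMg⟩)
        · exact Or.inl hg
        · exact absurd (h ▸ hMg) (by simp)
        · exact Or.inr ⟨M, hM, hMg⟩
    | some v =>
      simp only [PySem.Set.mem_add]
      constructor
      · rintro ((hg | rfl) | ⟨M, hM, hMg⟩)
        · exact Or.inl hg
        · exact Or.inr ⟨L, Or.inl rfl, h⟩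
        · exact Or.inr ⟨M, Or.inr hM, hMg⟩
      · rintro (hg | ⟨M, rfl | hM, hMg⟩)
        · exact Or.inl (Or.inl hg)
        · exact Or.inl (Or.inr (Option.some.inj (h ▸ hMg)).symm)
        · exact Or.inr ⟨M, hM, hMg⟩

-- membership after B's position scan, over any list of positions
theorem mem_bScan (s : String) (l : List Int) (found : PySem.Set Int) (g : Int) :
    g ∈ l.foldl (fun found i => bStep s i found) found ↔
      g ∈ found ∨ ∃ i ∈ l, ∃ L ∈ bLens,
        PySem.Dict.get? bTokenGroup (PySem.Str.slice s (some i) (some (i + (L : Int)))) = some g := by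
  induction l generalizing found with
  | nil => simp
  | cons i rest ih =>
    rw [List.foldl_cons, ih]
    unfold bStep
    rw [mem_bFold]
    constructor
    · rintro ((hg | ⟨L, hL, hLg⟩) | ⟨j, hj, L, hL, hLg⟩)
      · exact Or.inl hg
      · exact Or.inr ⟨i, List.mem_cons_self .., L, hL, hLg⟩
      · exact Or.inr ⟨j, List.mem_cons_of_mem _ hj, L, hL, hLg⟩
    · rintro (hg | ⟨j, hj, L, hL, hLg⟩)
      · exact Or.inl (Or.inl hg)
      · rcases List.mem_cons.1 hj with rfl | hj'
        · exact Or.inl (Or.inr ⟨L, hL, hLg⟩)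
        · exact Or.inr ⟨j, hj', L, hL, hLg⟩

-- the slice s[i:i+L] for a position 0 ≤ i, as a list slice
theorem key_eq (s : String) (i : Int) (L : Nat) (h : 0 ≤ i) :
    PySem.Str.slice s (some i) (some (i + (L : Int))) =
      String.ofList ((s.toList.drop i.toNat).take L) := by
  rw [PySem.Str.slice, PySem.Chars.slice_eq_listSlice,
    PySem.List.slice_toNat s.toList h (by omega)]
  have hL : (i + (L : Int)).toNat - i.toNat = L := by omega
  rw [hL]

-- the literal dict, as a lookup relation
theorem lookup_bTokenGroup (k : String) (g : Int) :
    PySem.Dict.get? bTokenGroup k = some g ↔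
      (k = "int" ∧ g = 0) ∨ (k = "integer" ∧ g = 0) ∨
      (k = "text" ∧ g = 1) ∨ (k = "longtext" ∧ g = 1) ∨ (k = "mediumtext" ∧ g = 1) ∨
      (k = "tinyint(1)" ∧ g = 2) ∨ (k = "boolean" ∧ g = 2) ∨
      (k = "varchar" ∧ g = 3) ∨ (k = "string" ∧ g = 3) := by
  rw [PySem.Dict.get?_eq_some_iff_mem_items bTokenGroup k g (by decide)]
  have h : bTokenGroup.items =
    [("int", 0), ("integer", 0), ("text", 1), ("longtext", 1), ("mediumtext", 1),
     ("tinyint(1)", 2), ("boolean", 2), ("varchar", 3), ("string", 3)] := by decide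
  rw [h]
  simp only [List.mem_cons, List.not_mem_nil, or_false, Prod.mk.injEq]

-- a token whose length is in bLens occurs as a fixed-length slice at some position iff it is an infix
theorem token_occurs (s : String) (tok : String) (hlen : tok.toList.length ∈ bLens) :
    (∃ i : Int, (0 ≤ i ∧ i < PySem.Str.len s) ∧ ∃ L ∈ bLens,
        (s.toList.drop i.toNat).take L = tok.toList) ↔ tok.toList <:+: s.toList := by
  constructor
  · rintro ⟨i, _, L, _, hEq⟩
    have h1 : tok.toList <+: s.toList.drop i.toNat := hEq ▸ List.take_prefix L (s.toList.drop i.toNat)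
    exact h1.isInfix.trans (s.toList.drop_suffix i.toNat).isInfix
  · rintro ⟨pre, suf, hcs⟩
    have htok : 3 ≤ tok.toList.length := by
      simp only [bLens, List.mem_cons, List.not_mem_nil, or_false] at hlen
      omega
    have hlen2 : s.toList.length = pre.length + tok.toList.length + suf.length := by
      rw [← hcs, List.length_append, List.length_append]
    refine ⟨(pre.length : Int), ⟨by omega, ?_⟩, tok.toList.length, hlen, ?_⟩
    · rw [PySem.Str.len_eq]; omega
    · have hdrop : s.toList.drop pre.length = tok.toList ++ suf := by
        rw [← hcs, List.append_assoc, List.drop_left]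
      simp only [Int.toNat_natCast]
      rw [hdrop, List.take_left]

-- B's collected set, characterized by the four per-group tests
set_option maxHeartbeats 1000000 in
theorem mem_bGroups (s : String) (g : Int) :
    g ∈ bGroups s ↔
      (g = 0 ∧ gA s = true) ∨ (g = 1 ∧ gB s = true) ∨
      (g = 2 ∧ gC s = true) ∨ (g = 3 ∧ gD s = true) := by
  have hofList : ∀ (l : List Char) (t : String), String.ofList l = t ↔ l = t.toList := by
    intro l t
    constructor
    · intro h; subst h; simp
    · intro h; subst h; simp
  have hisIn : ∀ t : String, PySem.Str.isIn t s = true ↔ t.toList <:+: s.toList :=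
    fun t => PySem.Str.isIn_iff_infix t s
  rw [bGroups, mem_bScan]
  simp only [PySem.Set.empty, List.not_mem_nil, false_or,
    gA, gB, gC, gD, Bool.or_eq_true, hisIn]
  constructor
  · rintro ⟨i, hi, L, hL, hk⟩
    rw [PySem.List.mem_pyRange_one] at hi
    rw [key_eq s i L hi.1, lookup_bTokenGroup] at hk
    rcases hk with ⟨hk, rfl⟩ | ⟨hk, rfl⟩ | ⟨hk, rfl⟩ | ⟨hk, rfl⟩ | ⟨hk, rfl⟩ |
      ⟨hk, rfl⟩ | ⟨hk, rfl⟩ | ⟨hk, rfl⟩ | ⟨hk, rfl⟩ <;> rw [hofList] at hk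
    · exact Or.inl ⟨rfl, Or.inl ((token_occurs s "int" (by decide)).1 ⟨i, hi, L, hL, hk⟩)⟩
    · exact Or.inl ⟨rfl, Or.inr ((token_occurs s "integer" (by decide)).1 ⟨i, hi, L, hL, hk⟩)⟩
    · exact Or.inr (Or.inl ⟨rfl, Or.inl ((token_occurs s "text" (by decide)).1 ⟨i, hi, L, hL, hk⟩)⟩)
    · exact Or.inr (Or.inl ⟨rfl, Or.inr (Or.inl ((token_occurs s "longtext" (by decide)).1 ⟨i, hi, L, hL, hk⟩))⟩)
    · exact Or.inr (Or.inl ⟨rfl, Or.inr (Or.inr ((token_occurs s "mediumtext" (by decide)).1 ⟨i, hi, L, hL, hk⟩))⟩)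
    · exact Or.inr (Or.inr (Or.inl ⟨rfl, Or.inl ((token_occurs s "tinyint(1)" (by decide)).1 ⟨i, hi, L, hL, hk⟩)⟩))
    · exact Or.inr (Or.inr (Or.inl ⟨rfl, Or.inr ((token_occurs s "boolean" (by decide)).1 ⟨i, hi, L, hL, hk⟩)⟩))
    · exact Or.inr (Or.inr (Or.inr ⟨rfl, Or.inl ((token_occurs s "varchar" (by decide)).1 ⟨i, hi, L, hL, hk⟩)⟩))
    · exact Or.inr (Or.inr (Or.inr ⟨rfl, Or.inr ((token_occurs s "string" (by decide)).1 ⟨i, hi, L, hL, hk⟩)⟩))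
  · have occ : ∀ t : String, t.toList.length ∈ bLens → t.toList <:+: s.toList →
        ∃ i ∈ PySem.List.pyRange 0 (PySem.Str.len s) 1, ∃ L ∈ bLens,
          PySem.Str.slice s (some i) (some (i + (L : Int))) = t := by
      intro t hlen hocc
      rcases (token_occurs s t hlen).2 hocc with ⟨i, hi, L, hL, hEq⟩
      refine ⟨i, PySem.List.mem_pyRange_one.2 hi, L, hL, ?_⟩
      rw [key_eq s i L hi.1]
      exact (hofList _ t).2 hEq
    rintro (⟨rfl, h | h⟩ | ⟨rfl, h | h | h⟩ | ⟨rfl, h | h⟩ | ⟨rfl, h | h⟩)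
    · rcases occ "int" (by decide) h with ⟨i, hi, L, hL, hk⟩
      exact ⟨i, hi, L, hL, (lookup_bTokenGroup _ _).2 (Or.inl ⟨hk, rfl⟩)⟩
    · rcases occ "integer" (by decide) h with ⟨i, hi, L, hL, hk⟩
      exact ⟨i, hi, L, hL, (lookup_bTokenGroup _ _).2 (Or.inr (Or.inl ⟨hk, rfl⟩))⟩
    · rcases occ "text" (by decide) h with ⟨i, hi, L, hL, hk⟩
      exact ⟨i, hi, L, hL, (lookup_bTokenGroup _ _).2 (Or.inr (Or.inr (Or.inl ⟨hk, rfl⟩)))⟩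
    · rcases occ "longtext" (by decide) h with ⟨i, hi, L, hL, hk⟩
      exact ⟨i, hi, L, hL, (lookup_bTokenGroup _ _).2 (Or.inr (Or.inr (Or.inr (Or.inl ⟨hk, rfl⟩))))⟩
    · rcases occ "mediumtext" (by decide) h with ⟨i, hi, L, hL, hk⟩
      exact ⟨i, hi, L, hL, (lookup_bTokenGroup _ _).2 (Or.inr (Or.inr (Or.inr (Or.inr (Or.inl ⟨hk, rfl⟩)))))⟩
    · rcases occ "tinyint(1)" (by decide) h with ⟨i, hi, L, hL, hk⟩
      exact ⟨i, hi, L, hL, (lookup_bTokenGroup _ _).2 (Or.inr (Or.inr (Or.inr (Or.inr (Or.inr (Or.inl ⟨hk, rfl⟩))))))⟩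
    · rcases occ "boolean" (by decide) h with ⟨i, hi, L, hL, hk⟩
      exact ⟨i, hi, L, hL, (lookup_bTokenGroup _ _).2 (Or.inr (Or.inr (Or.inr (Or.inr (Or.inr (Or.inr (Or.inl ⟨hk, rfl⟩)))))))⟩
    · rcases occ "varchar" (by decide) h with ⟨i, hi, L, hL, hk⟩
      exact ⟨i, hi, L, hL, (lookup_bTokenGroup _ _).2 (Or.inr (Or.inr (Or.inr (Or.inr (Or.inr (Or.inr (Or.inr (Or.inl ⟨hk, rfl⟩))))))))⟩
    · rcases occ "string" (by decide) h with ⟨i, hi, L, hL, hk⟩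
      exact ⟨i, hi, L, hL, (lookup_bTokenGroup _ _).2 (Or.inr (Or.inr (Or.inr (Or.inr (Or.inr (Or.inr (Or.inr (Or.inr ⟨hk, rfl⟩))))))))⟩

-- the intersection test equals A's disjunction of per-group conjunctions
set_option maxHeartbeats 1000000 in
theorem disjoint_eq (t1 t2 : String) :
    (!(PySem.Set.isdisjoint (bGroups t1) (bGroups t2))) =
      (gA t1 && gA t2 || (gB t1 && gB t2 || (gC t1 && gC t2 || gD t1 && gD t2))) := by
  rw [Bool.eq_iff_iff]
  constructor
  · intro hb
    have hx : ¬ (∀ x ∈ bGroups t1, x ∉ bGroups t2) := by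
      intro hall
      rw [← PySem.Set.isdisjoint_iff _ _] at hall
      simp [hall] at hb
    push Not at hx
    obtain ⟨x, hx1, hx2⟩ := hx
    rw [mem_bGroups] at hx1 hx2
    simp only [Bool.or_eq_true, Bool.and_eq_true]
    rcases hx1 with ⟨rfl, h1⟩ | ⟨rfl, h1⟩ | ⟨rfl, h1⟩ | ⟨rfl, h1⟩ <;>
      rcases hx2 with ⟨he, h2⟩ | ⟨he, h2⟩ | ⟨he, h2⟩ | ⟨he, h2⟩ <;>
      first
        | exact absurd he (by decide)
        | exact Or.inl ⟨h1, h2⟩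
        | exact Or.inr (Or.inl ⟨h1, h2⟩)
        | exact Or.inr (Or.inr (Or.inl ⟨h1, h2⟩))
        | exact Or.inr (Or.inr (Or.inr ⟨h1, h2⟩))
  · intro hb
    simp only [Bool.or_eq_true, Bool.and_eq_true] at hb
    have hex : ∃ x, x ∈ bGroups t1 ∧ x ∈ bGroups t2 := by
      rcases hb with ⟨h1, h2⟩ | ⟨h1, h2⟩ | ⟨h1, h2⟩ | ⟨h1, h2⟩
      · exact ⟨0, (mem_bGroups _ _).2 (Or.inl ⟨rfl, h1⟩), (mem_bGroups _ _).2 (Or.inl ⟨rfl, h2⟩)⟩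
      · exact ⟨1, (mem_bGroups _ _).2 (Or.inr (Or.inl ⟨rfl, h1⟩)),
          (mem_bGroups _ _).2 (Or.inr (Or.inl ⟨rfl, h2⟩))⟩
      · exact ⟨2, (mem_bGroups _ _).2 (Or.inr (Or.inr (Or.inl ⟨rfl, h1⟩))),
          (mem_bGroups _ _).2 (Or.inr (Or.inr (Or.inl ⟨rfl, h2⟩)))⟩
      · exact ⟨3, (mem_bGroups _ _).2 (Or.inr (Or.inr (Or.inr ⟨rfl, h1⟩))),
          (mem_bGroups _ _).2 (Or.inr (Or.inr (Or.inr ⟨rfl, h2⟩)))⟩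
    obtain ⟨x, hx1, hx2⟩ := hex
    cases hd : PySem.Set.isdisjoint (bGroups t1) (bGroups t2) with
    | false => rfl
    | true => exact absurd hx2 ((PySem.Set.isdisjoint_iff _ _).1 hd x hx1)

-- ===== VERDICT (by name: the statement is the Claim_ definition above) =====
theorem types_match_spec : Claim_equal_types_match := by
  intro type1 type2 _
  unfold Spec_types_match types_match types_match_alt
  by_cases h : (PySem.Str.replace (PySem.Str.replace type1 "(11)" "") " " "" ==
      PySem.Str.replace (PySem.Str.replace type2 "(11)" "") " " "") = true
  · simp [h]
  · simp only [Bool.not_eq_true] at h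
    simp [h, tmLoop_eq, disjoint_eq]
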